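-- pv_equiv track=rewrite | github.com/nestorcastelblanco/Bibliometria_AA | requirement_grafos/term_graph.py | _window_cooccurrence
-- ===== SOURCE A (Python) =====
-- from typing import Dict, List, Tuple, Any, Iterable
-- from collections import defaultdict, Counter
--
-- def _window_cooccurrence(tokens: List[str], vocab: set[str], window: int = 20) -> Counter[Tuple[str,str]]:
--     """
--     Calcula co-ocurrencias de términos dentro de ventanas deslizantes de texto.
--
--     Utiliza una ventana deslizante sobre la secuencia de tokens para identificar
--     pares de términos que aparecen cerca uno del otro. Solo cuenta pares donde
--     ambos términos están en el vocabulario especificado.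
--
--     Args:
--         tokens (List[str]): Secuencia de tokens del texto (ya tokenizado)
--         vocab (set[str]): Conjunto de términos de interés para contar co-ocurrencias
--         window (int): Tamaño de la ventana en tokens (por defecto 20)
--
--     Returns:
--         Counter[Tuple[str,str]]: Contador de pares ordenados (term1, term2) con
--                                 sus frecuencias de co-ocurrencia
--
--     Ejemplo:
--         >>> tokens = ["machine", "learning", "is", "a", "type", "of", "artificial", "intelligence"]
--         >>> vocab = {"machine", "learning", "artificial", "intelligence"}
--         >>> result = _window_cooccurrence(tokens, vocab, window=10)
--         >>> result[("artificial", "machine")]  # Ordenado alfabéticamente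
--         1
--
--     Notas:
--         - Los pares se almacenan en orden alfabético para evitar duplicados
--         - No se cuentan auto-co-ocurrencias (término consigo mismo)
--         - La ventana avanza desde cada posición i hasta min(i+window, fin_texto)
--     """
--     c = Counter()
--     if not vocab:
--         return c
--
--     n = len(tokens)
--     # Para cada posición en el texto
--     for i in range(n):
--         # Si el token actual no está en el vocabulario, saltar
--         if tokens[i] not in vocab:
--             continue
--
--         # Definir límite de la ventana
--         jmax = min(n, i + window)
--
--         # Buscar co-ocurrencias dentro de la ventana
--         for j in range(i+1, jmax):
--             if tokens[j] not in vocab: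
--                 continue
--
--             # Ordenar alfabéticamente para evitar duplicados (a,b) y (b,a)
--             a, b = sorted((tokens[i], tokens[j]))
--
--             # No contar auto-co-ocurrencias
--             if a != b:
--                 c[(a, b)] += 1
--
--     return c
-- ===== SOURCE B (Python) =====
-- from collections import Counter
-- from typing import List, Tuple
--
-- def _window_cooccurrence(tokens: List[str], vocab: set, window: int = 20) -> Counter:
--     c = Counter()
--     # positions of vocab tokens only; everything else is never touched again
--     positions = [(i, t) for i, t in enumerate(tokens) if t in vocab]
--     for p, (i, ti) in enumerate(positions):
--         for (j, tj) in positions[p + 1:]: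
--             if j - i >= window:
--                 break  # indices are increasing: nothing further can be in range
--             a, b = (ti, tj) if ti <= tj else (tj, ti)
--             if a != b:
--                 c[(a, b)] += 1
--     return c
-- ===== Notes on version B (the rewrite author's own statement) =====
-- stated objective: faster
-- what changed: Precompute the positions of vocab tokens once, then scan only vocab-position pairs and break the inner loop as soon as the index distance reaches the window, instead of rescanning every token of every window.
import Mathlib
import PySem

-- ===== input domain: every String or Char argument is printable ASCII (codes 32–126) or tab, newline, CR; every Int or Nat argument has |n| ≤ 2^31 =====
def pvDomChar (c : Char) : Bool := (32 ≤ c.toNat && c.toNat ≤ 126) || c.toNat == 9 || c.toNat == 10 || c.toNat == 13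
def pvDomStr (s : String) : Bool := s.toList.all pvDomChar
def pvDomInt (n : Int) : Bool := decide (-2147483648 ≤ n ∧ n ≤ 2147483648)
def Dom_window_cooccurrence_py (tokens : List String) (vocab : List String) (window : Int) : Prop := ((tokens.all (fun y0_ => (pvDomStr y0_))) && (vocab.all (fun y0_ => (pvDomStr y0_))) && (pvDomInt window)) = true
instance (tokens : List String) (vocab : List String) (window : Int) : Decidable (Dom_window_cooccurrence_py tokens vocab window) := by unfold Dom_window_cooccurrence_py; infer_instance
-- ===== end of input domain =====

-- B builds the list of vocab-token positions once and, for each such position, scans only the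
-- later vocab positions, breaking as soon as the index distance reaches the window (objective: faster).

-- ===== PORT A =====
def window_cooccurrence_py (tokens : List String) (vocab : List String) (window : Int) : List (String × String × Int) :=
  let c : PySem.Dict (String × String) Int := PySem.Dict.empty
  let c :=
    if vocab = [] then c
    else
      let n : Int := PySem.List.len tokens
      (PySem.List.pyRange 0 n 1).foldl (fun c i =>
        if PySem.List.pyGetD tokens i "" ∈ vocab then
          let jmax : Int := min n (i + window)
          (PySem.List.pyRange (i + 1) jmax 1).foldl (fun c j =>
            if PySem.List.pyGetD tokens j "" ∈ vocab then
              -- a, b = sorted((tokens[i], tokens[j]))  (two-element sort)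
              let ab : String × String :=
                if PySem.List.pyGetD tokens j "" < PySem.List.pyGetD tokens i "" then
                  (PySem.List.pyGetD tokens j "", PySem.List.pyGetD tokens i "")
                else (PySem.List.pyGetD tokens i "", PySem.List.pyGetD tokens j "")
              if ab.1 ≠ ab.2 then PySem.Dict.modify c ab 0 (· + 1) else c
            else c) c
        else c) c
  (PySem.Dict.items c).map (fun p => (p.1.1, p.1.2, p.2))

-- ===== PORT B =====
-- B-side helpers: the counted increment, the inner scan (with break), the outer scan
def pvBumpB (c : PySem.Dict (String × String) Int) (ti tj : String) : PySem.Dict (String × String) Int :=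
  let ab : String × String := if ti ≤ tj then (ti, tj) else (tj, ti)
  if ab.1 ≠ ab.2 then PySem.Dict.modify c ab 0 (· + 1) else c

def pvInnerB (window : Int) (i : Int) (ti : String) :
    List (Int × String) → PySem.Dict (String × String) Int → PySem.Dict (String × String) Int
  | [], c => c
  | (j, tj) :: rest, c =>
    if window ≤ j - i then c  -- break: positions are increasing
    else pvInnerB window i ti rest (pvBumpB c ti tj)

def pvOuterB (window : Int) :
    List (Int × String) → PySem.Dict (String × String) Int → PySem.Dict (String × String) Int
  | [], c => c
  | (i, ti) :: rest, c => pvOuterB window rest (pvInnerB window i ti rest c)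

def window_cooccurrence_py_alt (tokens : List String) (vocab : List String) (window : Int) : List (String × String × Int) :=
  let positions : List (Int × String) := (PySem.List.enumerate tokens).filter (fun p => decide (p.2 ∈ vocab))
  (PySem.Dict.items (pvOuterB window positions PySem.Dict.empty)).map (fun p => (p.1.1, p.1.2, p.2))

-- ===== PRECONDITION & SPEC =====
def Spec_window_cooccurrence_py (tokens : List String) (vocab : List String) (window : Int) (out : List (String × String × Int)) : Prop := out = window_cooccurrence_py_alt tokens vocab window
instance (tokens : List String) (vocab : List String) (window : Int) (out : List (String × String × Int)) : Decidable (Spec_window_cooccurrence_py tokens vocab window out) := by unfold Spec_window_cooccurrence_py; infer_instance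

-- ===== CLAIM (what is proved, stated in full; the proofs are below) =====
def Claim_equal_window_cooccurrence_py : Prop := ∀ (tokens : List String) (vocab : List String) (window : Int), Dom_window_cooccurrence_py tokens vocab window → Spec_window_cooccurrence_py tokens vocab window (window_cooccurrence_py tokens vocab window)

-- ===== LEMMAS AND PROOFS =====

-- A's two-element sort followed by the self-pair test is B's bump.
theorem pvBumpA_eq_pvBumpB (c : PySem.Dict (String × String) Int) (ti tj : String) :
    (if (if tj < ti then (tj, ti) else (ti, tj)).1 ≠ (if tj < ti then (tj, ti) else (ti, tj)).2 then
        PySem.Dict.modify c (if tj < ti then (tj, ti) else (ti, tj)) 0 (· + 1)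
      else c)
      = pvBumpB c ti tj := by
  unfold pvBumpB
  rcases le_or_gt ti tj with h | h
  · rw [if_neg (not_lt.mpr h), if_pos h]
  · rw [if_pos h, if_neg (not_le.mpr h)]

-- break = takeWhile on the literal condition
theorem pvInnerB_eq_foldl_takeWhile (window i : Int) (ti : String) (rest : List (Int × String))
    (c : PySem.Dict (String × String) Int) :
    pvInnerB window i ti rest c =
      (rest.takeWhile (fun p => decide (p.1 - i < window))).foldl (fun c p => pvBumpB c ti p.2) c := by
  induction rest generalizing c with
  | nil => rfl
  | cons p rest ih =>
    obtain ⟨j, tj⟩ := p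
    by_cases h : window ≤ j - i
    · simp [pvInnerB, h, not_lt.mpr h]
    · rw [pvInnerB, if_neg h, List.takeWhile_cons, if_pos (decide_eq_true (not_le.mp h)),
        List.foldl_cons, ih]

-- on a strictly increasing list, takeWhile of a window bound is filter
theorem takeWhile_window_eq_filter (i window : Int) (l : List Int)
    (hs : l.Pairwise (· < ·)) :
    l.takeWhile (fun j => decide (j - i < window)) = l.filter (fun j => decide (j - i < window)) := by
  induction l with
  | nil => rfl
  | cons x l ih =>
    rcases List.pairwise_cons.mp hs with ⟨hx, hl⟩
    by_cases h : x - i < window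
    · simp [h, ih hl]
    · simp only [List.takeWhile_cons, List.filter_cons, decide_eq_false h, Bool.false_eq_true,
        if_false]
      symm
      rw [List.filter_eq_nil_iff]
      intro j hj
      have := hx j hj
      simp only [decide_eq_true_eq]
      omega

-- range identity: A's window segment is the window-filter of the whole tail range
theorem pyRange_window_eq_filter (i window n : Int) (hin : i < n) :
    PySem.List.pyRange (i + 1) (min n (i + window)) 1 =
      (PySem.List.pyRange (i + 1) n 1).filter (fun j => decide (j - i < window)) := by
  set m : Int := max (i + 1) (min n (i + window)) with hm
  have hsplit : PySem.List.pyRange (i + 1) n 1 =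
      PySem.List.pyRange (i + 1) m 1 ++ PySem.List.pyRange m n 1 :=
    PySem.List.pyRange_one_append _ _ _ (by omega) (by omega)
  rw [hsplit, List.filter_append]
  have h1 : (PySem.List.pyRange (i + 1) m 1).filter (fun j => decide (j - i < window)) =
      PySem.List.pyRange (i + 1) m 1 := by
    rw [List.filter_eq_self]
    intro j hj
    have := PySem.List.mem_pyRange_one.mp hj
    simp only [decide_eq_true_eq]
    omega
  have h2 : (PySem.List.pyRange m n 1).filter (fun j => decide (j - i < window)) = [] := by
    rw [List.filter_eq_nil_iff]
    intro j hj
    have := PySem.List.mem_pyRange_one.mp hj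
    simp only [decide_eq_true_eq]
    omega
  rw [h1, h2, List.append_nil]
  by_cases hw : i + 1 ≤ min n (i + window)
  · rw [hm, max_eq_right hw]
  · rw [hm, max_eq_left (by omega)]
    rw [PySem.List.pyRange_one_eq_nil (by omega), PySem.List.pyRange_one_eq_nil (by omega)]

-- the inner loop of A equals B's inner scan over the remaining vocab positions
theorem inner_eq (tokens vocab : List String) (window i : Int)
    (hin : i < PySem.List.len tokens)
    (c : PySem.Dict (String × String) Int) :
    (PySem.List.pyRange (i + 1) (min (PySem.List.len tokens) (i + window)) 1).foldl (fun c j =>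
        if PySem.List.pyGetD tokens j "" ∈ vocab then
          let ab : String × String :=
            if PySem.List.pyGetD tokens j "" < PySem.List.pyGetD tokens i "" then
              (PySem.List.pyGetD tokens j "", PySem.List.pyGetD tokens i "")
            else (PySem.List.pyGetD tokens i "", PySem.List.pyGetD tokens j "")
          if ab.1 ≠ ab.2 then PySem.Dict.modify c ab 0 (· + 1) else c
        else c) c =
      pvInnerB window i (PySem.List.pyGetD tokens i "")
        (((PySem.List.pyRange (i + 1) (PySem.List.len tokens) 1).filter
            (fun j => decide (PySem.List.pyGetD tokens j "" ∈ vocab))).map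
          (fun j => (j, PySem.List.pyGetD tokens j ""))) c := by
  rw [pvInnerB_eq_foldl_takeWhile, List.takeWhile_map]
  have htw : ((PySem.List.pyRange (i + 1) (PySem.List.len tokens) 1).filter
        (fun j => decide (PySem.List.pyGetD tokens j "" ∈ vocab))).takeWhile
        ((fun p : Int × String => decide (p.1 - i < window)) ∘ (fun j => (j, PySem.List.pyGetD tokens j ""))) =
      ((PySem.List.pyRange (i + 1) (PySem.List.len tokens) 1).filter
        (fun j => decide (PySem.List.pyGetD tokens j "" ∈ vocab))).filter
        (fun j => decide (j - i < window)) := by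
    exact takeWhile_window_eq_filter i window _
      ((PySem.List.pairwise_lt_pyRange_one _ _).filter _)
  rw [htw, List.foldl_map, List.filter_filter]
  rw [pyRange_window_eq_filter i window _ hin]
  rw [PySem.List.foldl_ite_eq_foldl_filter (fun j => PySem.List.pyGetD tokens j "" ∈ vocab), List.filter_filter]
  rw [List.filter_congr (fun j _ => by rw [Bool.and_comm])]
  apply PySem.List.foldl_congr_mem
  intro acc j hj
  simp only
  exact pvBumpA_eq_pvBumpB acc (PySem.List.pyGetD tokens i "") (PySem.List.pyGetD tokens j "")

-- the outer loop of A from position a equals B's outer scan over the vocab positions ≥ a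
theorem outer_eq (tokens vocab : List String) (window : Int) (k : Nat) :
    ∀ (a : Int) (c : PySem.Dict (String × String) Int), 0 ≤ a →
      PySem.List.len tokens ≤ a + k →
    (PySem.List.pyRange a (PySem.List.len tokens) 1).foldl (fun c i =>
        if PySem.List.pyGetD tokens i "" ∈ vocab then
          (PySem.List.pyRange (i + 1) (min (PySem.List.len tokens) (i + window)) 1).foldl (fun c j =>
            if PySem.List.pyGetD tokens j "" ∈ vocab then
              let ab : String × String :=
                if PySem.List.pyGetD tokens j "" < PySem.List.pyGetD tokens i "" then
                  (PySem.List.pyGetD tokens j "", PySem.List.pyGetD tokens i "")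
                else (PySem.List.pyGetD tokens i "", PySem.List.pyGetD tokens j "")
              if ab.1 ≠ ab.2 then PySem.Dict.modify c ab 0 (· + 1) else c
            else c) c
        else c) c =
      pvOuterB window
        (((PySem.List.pyRange a (PySem.List.len tokens) 1).filter
            (fun j => decide (PySem.List.pyGetD tokens j "" ∈ vocab))).map
          (fun j => (j, PySem.List.pyGetD tokens j ""))) c := by
  induction k with
  | zero =>
    intro a c _ hak
    rw [PySem.List.pyRange_one_eq_nil (by omega)]
    rfl
  | succ k ih =>
    intro a c ha hak
    by_cases hlt : a < PySem.List.len tokens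
    · rw [PySem.List.pyRange_one_cons hlt]
      by_cases hv : PySem.List.pyGetD tokens a "" ∈ vocab
      · simp only [List.filter_cons, decide_eq_true hv, if_true, List.map_cons, List.foldl_cons, if_pos hv]
        rw [show ∀ (L : List (Int × String)) (c' : PySem.Dict (String × String) Int),
              pvOuterB window ((a, PySem.List.pyGetD tokens a "") :: L) c' =
                pvOuterB window L (pvInnerB window a (PySem.List.pyGetD tokens a "") L c')
            from fun _ _ => rfl]
        rw [← inner_eq tokens vocab window a hlt c]
        exact ih (a + 1) _ (by omega) (by omega)
      · simp only [List.filter_cons, decide_eq_false hv, Bool.false_eq_true, if_false,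
          List.foldl_cons, if_neg hv]
        exact ih (a + 1) c (by omega) (by omega)
    · rw [PySem.List.pyRange_one_eq_nil (by omega)]
      rfl

-- ===== VERDICT (by name: the statement is the Claim_ definition above) =====
theorem window_cooccurrence_py_spec : Claim_equal_window_cooccurrence_py := by
  intro tokens vocab window _
  unfold Spec_window_cooccurrence_py window_cooccurrence_py window_cooccurrence_py_alt
  by_cases hv : vocab = []
  · simp only [hv, if_pos]
    have hpos : (PySem.List.enumerate tokens).filter (fun p => decide (p.2 ∈ ([] : List String))) = [] := by
      rw [List.filter_eq_nil_iff]; intro p _; simp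
    rw [hpos]
    rfl
  · simp only [if_neg hv]
    rw [PySem.List.enumerate_eq_map_pyRange tokens "", List.filter_map]
    exact congrArg (fun d => (PySem.Dict.items d).map (fun p => (p.1.1, p.1.2, p.2)))
      (outer_eq tokens vocab window tokens.length 0 PySem.Dict.empty le_rfl
        (by simp [PySem.List.len_eq]))
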